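-- pv_equiv track=rewrite | github.com/0314pie/coding-test-training | 프로그래머스/0/181834. l로 만들기/l로 만들기.py | solution
-- ===== SOURCE A (Python) =====
-- def solution(myString):
--     answer = ""
--     for a in myString:
--         if ord(a) < ord("l"):
--             answer += "l"
--         else:
--             answer += a
--     return answer
-- ===== SOURCE B (Python) =====
-- import re
--
-- def solution(myString):
--     return re.sub(r'[\x00-\x6b]', 'l', myString)
-- ===== Notes on version B (the rewrite author's own statement) =====
-- stated objective: idiomatic
-- what changed: Replaced the char-by-char accumulator loop with a single regex substitution whose character class covers exactly the codes below ord('l'), traversed once by the regex engine.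
import Mathlib
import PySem

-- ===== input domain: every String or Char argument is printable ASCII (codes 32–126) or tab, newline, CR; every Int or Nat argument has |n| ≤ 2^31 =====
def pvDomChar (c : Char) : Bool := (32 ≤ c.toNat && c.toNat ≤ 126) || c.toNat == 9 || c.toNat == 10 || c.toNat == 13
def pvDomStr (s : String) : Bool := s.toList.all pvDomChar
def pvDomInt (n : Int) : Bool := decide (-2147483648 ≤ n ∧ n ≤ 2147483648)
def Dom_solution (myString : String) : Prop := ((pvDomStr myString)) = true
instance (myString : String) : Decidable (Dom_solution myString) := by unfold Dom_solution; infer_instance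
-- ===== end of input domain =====

-- B replaces A's char-by-char accumulator loop with one regex substitution ('[\x00-\x6b]' -> 'l'), ported as a map over the chars.


-- ===== PORT A =====
-- loop: for a in myString: answer += 'l' if ord(a) < ord('l') else a
def solutionLoopA (answer : List Char) (rest : List Char) : List Char :=
  match rest with
  | [] => answer
  | a :: rest => solutionLoopA (answer ++ (if a.toNat < 'l'.toNat then ['l'] else [a])) rest

def solution (myString : String) : String :=
  String.ofList (solutionLoopA [] myString.toList)

-- ===== PORT B =====
-- re.sub(r'[\x00-\x6b]', 'l', myString): each char matching the class (code ≤ 0x6b) is replaced by 'l'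
def solution_alt (myString : String) : String :=
  String.ofList (myString.toList.map (fun c => if c.toNat ≤ 0x6b then 'l' else c))

-- ===== PRECONDITION & SPEC =====
def Spec_solution (myString : String) (out : String) : Prop := out = solution_alt myString
instance (myString : String) (out : String) : Decidable (Spec_solution myString out) := by unfold Spec_solution; infer_instance

-- ===== CLAIM (what is proved, stated in full; the proofs are below) =====
def Claim_equal_solution : Prop := ∀ (myString : String), Dom_solution myString → Spec_solution myString (solution myString)

-- ===== LEMMAS AND PROOFS =====
theorem solutionLoopA_eq (rest : List Char) : ∀ (answer : List Char),
    solutionLoopA answer rest = answer ++ rest.map (fun c => if c.toNat ≤ 0x6b then 'l' else c) := by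
  induction rest with
  | nil => intro answer; simp [solutionLoopA]
  | cons a rest ih =>
    intro answer
    simp only [solutionLoopA, ih, List.map_cons, List.append_assoc]
    rcases Nat.lt_or_ge a.toNat 108 with h | h
    · simp [h, Nat.lt_succ_iff.mp h]
    · simp [Nat.not_lt.mpr h, Nat.not_le.mpr h]

-- ===== VERDICT (by name: the statement is the Claim_ definition above) =====
theorem solution_spec : Claim_equal_solution := by
  intro s _
  show _ = _
  simp [solution, solution_alt, solutionLoopA_eq]
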